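-- pv_equiv track=rewrite | github.com/ankurbhambri/DS-Algo | mt/Merge_3_Sorted_Arrays.py | merger_arrays
-- ===== SOURCE A (Python) =====
-- def merger_arrays(a, b, c):
--
--     res = []
--     i, j, k = 0, 0, 0
--
--     while i < len(a) or j < len(b) or k < len(c):
--
--         a_val = a[i] if i < len(a) else float("inf")
--         b_val = b[j] if j < len(b) else float("inf")
--         c_val = c[k] if k < len(c) else float("inf")
--
--         min_val = min(a_val, min(b_val, c_val))
--
--         res.append(min_val)
--
--         while i < len(a) and a[i] == min_val:
--             i += 1
--
--         while j < len(b) and b[j] == min_val: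
--             j += 1
--
--         while k < len(c) and c[k] == min_val:
--             k += 1
--
--     return res
-- ===== SOURCE B (Python) =====
-- def merger_arrays(a, b, c):
--     def collapse(xs):
--         out = []
--         for x in xs:
--             if not out or out[-1] != x:
--                 out.append(x)
--         return out
--
--     ta = collapse(a)
--     ta.reverse()
--     tb = collapse(b)
--     tb.reverse()
--     tc = collapse(c)
--     tc.reverse()
--     res = []
--     while ta or tb or tc:
--         m = min(t[-1] for t in (ta, tb, tc) if t)
--         res.append(m)
--         if ta and ta[-1] == m:
--             ta.pop()
--         if tb and tb[-1] == m:
--             tb.pop()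
--         if tc and tc[-1] == m:
--             tc.pop()
--     return res
-- ===== Notes on version B (the rewrite author's own statement) =====
-- stated objective: alternative
-- what changed: Instead of walking three index pointers with per-step inner while-loops that rescan duplicate runs, B first collapses adjacent duplicate runs of each list in one preprocessing pass and then min-merges the three collapsed lists popping exactly one element per matching list per step.
import Mathlib
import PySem

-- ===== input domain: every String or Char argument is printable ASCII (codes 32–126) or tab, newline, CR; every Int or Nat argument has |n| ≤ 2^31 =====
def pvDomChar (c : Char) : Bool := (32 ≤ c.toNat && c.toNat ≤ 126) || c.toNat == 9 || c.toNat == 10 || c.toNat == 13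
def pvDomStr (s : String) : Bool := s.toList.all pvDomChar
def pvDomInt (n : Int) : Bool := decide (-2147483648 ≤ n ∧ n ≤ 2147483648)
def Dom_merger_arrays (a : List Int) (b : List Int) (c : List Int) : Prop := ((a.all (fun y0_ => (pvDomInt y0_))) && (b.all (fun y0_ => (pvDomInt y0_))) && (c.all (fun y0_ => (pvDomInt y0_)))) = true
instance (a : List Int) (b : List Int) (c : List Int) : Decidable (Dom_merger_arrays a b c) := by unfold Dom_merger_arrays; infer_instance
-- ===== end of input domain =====

-- B replaces A's three-pointer walk with per-step duplicate-skipping inner loops by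
-- "collapse adjacent duplicate runs of each list in one pass, reverse, then min-merge popping one element per step" (alternative).

-- ===== PORT A =====
-- 'while i < len(xs) and xs[i] == v: i += 1'
def skipEq (xs : List Int) (v : Int) (i : Nat) : Nat :=
  if h : i < xs.length then
    if xs[i] = v then skipEq xs v (i + 1) else i
  else i
termination_by xs.length - i

-- the ∞-absorbing minimum of A's 'min(a_val, min(b_val, c_val))': none plays float("inf")
def omin (x y : Option Int) : Option Int :=
  match x, y with
  | none, y => y
  | some a, none => some a
  | some a, some b => some (min a b)

-- the outer while loop of A; fuel only guards totality (merger_arrays hands it enough, see mergeLoop_spec)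
def mergeLoop (la lb lc : List Int) (i j k : Nat) (fuel : Nat) : List Int :=
  match fuel with
  | 0 => []
  | fuel + 1 =>
    if i < la.length ∨ j < lb.length ∨ k < lc.length then
      match omin (if h : i < la.length then some la[i] else none)
          (omin (if h : j < lb.length then some lb[j] else none)
                (if h : k < lc.length then some lc[k] else none)) with
      | some m => m :: mergeLoop la lb lc (skipEq la m i) (skipEq lb m j) (skipEq lc m k) fuel
      | none => []   -- unreachable: at least one value is in range
    else []

def merger_arrays (a : List Int) (b : List Int) (c : List Int) : List Int :=
  mergeLoop a b c 0 0 0 (a.length + b.length + c.length + 1)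

-- ===== PORT B =====
-- 'if not out or out[-1] != x: out.append(x)'
def collapseStep (out : List Int) (x : Int) : List Int :=
  if out = [] ∨ out.getLast? ≠ some x then out ++ [x] else out

-- B's collapse(xs): one pass dropping adjacent duplicates
def collapse (xs : List Int) : List Int := xs.foldl collapseStep []

-- the generator '(t[-1] for t in (ta, tb, tc) if t)'
def lasts (ta tb tc : List Int) : List Int :=
  (match ta.getLast? with | none => [] | some x => [x]) ++
  (match tb.getLast? with | none => [] | some x => [x]) ++
  (match tc.getLast? with | none => [] | some x => [x])

-- 'if t and t[-1] == m: t.pop()'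
def popLastIf (t : List Int) (m : Int) : List Int :=
  if t.getLast? = some m then t.dropLast else t

-- B's while loop; fuel only guards totality (merger_arrays_alt hands it enough)
def mergeB (ta tb tc : List Int) (fuel : Nat) : List Int :=
  match fuel with
  | 0 => []
  | fuel + 1 =>
    if ta ≠ [] ∨ tb ≠ [] ∨ tc ≠ [] then
      match PySem.List.min? (lasts ta tb tc) (fun x => x) with
      | some m => m :: mergeB (popLastIf ta m) (popLastIf tb m) (popLastIf tc m) fuel
      | none => []   -- unreachable: min over a nonempty generator
    else []

def merger_arrays_alt (a : List Int) (b : List Int) (c : List Int) : List Int :=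
  mergeB (collapse a).reverse (collapse b).reverse (collapse c).reverse
    ((collapse a).length + (collapse b).length + (collapse c).length + 1)

-- ===== PRECONDITION & SPEC =====
def Spec_merger_arrays (a : List Int) (b : List Int) (c : List Int) (out : List Int) : Prop := out = merger_arrays_alt a b c
instance (a : List Int) (b : List Int) (c : List Int) (out : List Int) : Decidable (Spec_merger_arrays a b c out) := by unfold Spec_merger_arrays; infer_instance

-- ===== CLAIM (what is proved, stated in full; the proofs are below) =====
def Claim_equal_merger_arrays : Prop := ∀ (a : List Int) (b : List Int) (c : List Int), Dom_merger_arrays a b c → Spec_merger_arrays a b c (merger_arrays a b c)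

-- ===== LEMMAS AND PROOFS =====

-- proof-side view of B's pop on the unreversed list
def popIf (t : List Int) (m : Int) : List Int :=
  if t.head? = some m then t.drop 1 else t

lemma popLastIf_reverse (s : List Int) (m : Int) :
    popLastIf s.reverse m = (popIf s m).reverse := by
  unfold popLastIf popIf
  rw [List.getLast?_reverse]
  by_cases h : s.head? = some m
  · rw [if_pos h, if_pos h]
    cases s with
    | nil => rfl
    | cons x t => simp
  · rw [if_neg h, if_neg h]

lemma min?_lasts_reverse (ta tb tc : List Int) :
    PySem.List.min? (lasts ta.reverse tb.reverse tc.reverse) (fun x => x)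
      = omin ta.head? (omin tb.head? tc.head?) := by
  unfold lasts
  rw [List.getLast?_reverse, List.getLast?_reverse, List.getLast?_reverse]
  cases ta <;> cases tb <;> cases tc <;>
    simp [omin, PySem.List.min?, min_def] <;> split_ifs <;> simp_all <;> omega

lemma skipEq_ge (xs : List Int) (v : Int) (i : Nat) : i ≤ skipEq xs v i := by
  fun_induction skipEq xs v i with
  | case1 i h heq ih => omega
  | case2 i h heq => exact le_refl i
  | case3 i h => exact le_refl i

lemma skipEq_le_len (xs : List Int) (v : Int) (i : Nat) :
    skipEq xs v i ≤ max i xs.length := by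
  fun_induction skipEq xs v i with
  | case1 i h heq ih => omega
  | case2 i h heq => omega
  | case3 i h => omega

lemma skipEq_lt (xs : List Int) (v : Int) (i : Nat) (h : i < xs.length) (heq : xs[i] = v) :
    i < skipEq xs v i := by
  have := skipEq_ge xs v (i + 1)
  unfold skipEq; simp [h, heq]; omega

lemma omin3_eq_some {x y z : Option Int} {m : Int} (h : omin x (omin y z) = some m) :
    x = some m ∨ y = some m ∨ z = some m := by
  cases x <;> cases y <;> cases z <;> simp [omin] at h ⊢ <;> omega

lemma omin3_eq_none {x y z : Option Int} (h : omin x (omin y z) = none) :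
    x = none ∧ y = none ∧ z = none := by
  cases x <;> cases y <;> cases z <;> simp [omin] at h ⊢

-- the tail recursion collapse's foldl amounts to, once the accumulator is nonempty
def collapseFrom (p : Int) (xs : List Int) : List Int :=
  match xs with
  | [] => []
  | x :: t => if x = p then collapseFrom p t else x :: collapseFrom x t

lemma foldl_collapseStep (xs : List Int) (out : List Int) (p : Int)
    (h : out.getLast? = some p) :
    xs.foldl collapseStep out = out ++ collapseFrom p xs := by
  induction xs generalizing out p with
  | nil => simp [collapseFrom]
  | cons x t ih =>
    have hne : out ≠ [] := by intro he; rw [he] at h; simp at h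
    by_cases hx : x = p
    · subst hx
      have hstep : collapseStep out x = out := by
        simp [collapseStep, hne, h]
      simp only [List.foldl_cons, hstep, collapseFrom]
      exact ih out x h
    · have hstep : collapseStep out x = out ++ [x] := by
        simp [collapseStep, h]
        omega
      simp only [List.foldl_cons, hstep, collapseFrom, if_neg (by exact hx)]
      rw [ih (out ++ [x]) x (by simp)]
      simp

lemma collapse_cons (x : Int) (t : List Int) :
    collapse (x :: t) = x :: collapseFrom x t := by
  unfold collapse
  have : collapseStep [] x = [x] := by simp [collapseStep]
  simp only [List.foldl_cons, this]
  exact foldl_collapseStep t [x] x rfl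

lemma collapse_head (xs : List Int) : (collapse xs).head? = xs.head? := by
  cases xs with
  | nil => rfl
  | cons x t => rw [collapse_cons]; rfl

lemma collapseFrom_eq_collapse_dropWhile (p : Int) (t : List Int) :
    collapseFrom p t = collapse (t.dropWhile (fun y => y == p)) := by
  induction t generalizing p with
  | nil => simp [collapseFrom, collapse]
  | cons x t ih =>
    unfold collapseFrom
    by_cases hx : x = p
    · subst hx
      rw [if_pos rfl, List.dropWhile_cons_of_pos (by simp)]
      exact ih x
    · rw [if_neg hx, List.dropWhile_cons_of_neg (by simp [hx]), collapse_cons]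

lemma collapse_dropWhile_eq_popIf (zs : List Int) (m : Int) :
    collapse (zs.dropWhile (fun y => y == m)) = popIf (collapse zs) m := by
  cases zs with
  | nil => simp [collapse, popIf]
  | cons z t =>
    by_cases hz : z = m
    · subst hz
      rw [List.dropWhile_cons_of_pos (by simp), ← collapseFrom_eq_collapse_dropWhile,
        collapse_cons, popIf]
      simp
    · rw [List.dropWhile_cons_of_neg (by simp [hz]), collapse_cons, popIf]
      simp [hz]

lemma drop_skipEq (xs : List Int) (m : Int) (i : Nat) :
    xs.drop (skipEq xs m i) = (xs.drop i).dropWhile (fun y => y == m) := by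
  fun_induction skipEq xs m i with
  | case1 i h heq ih =>
    rw [ih, ← List.getElem_cons_drop h, heq, List.dropWhile_cons_of_pos (by simp)]
  | case2 i h heq =>
    rw [← List.getElem_cons_drop h, List.dropWhile_cons_of_neg (by simp [heq])]
  | case3 i h =>
    rw [List.drop_eq_nil_of_le (by omega)]
    rfl

-- the suffix A works on, collapsed, is exactly B's current list: heads agree
lemma head?_drop (xs : List Int) (i : Nat) :
    (xs.drop i).head? = if h : i < xs.length then some xs[i] else none := by
  by_cases h : i < xs.length
  · rw [← List.getElem_cons_drop h]; simp [h]
  · rw [List.drop_eq_nil_of_le (by omega)]; simp [h]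

lemma length_popIf_le (t : List Int) (m : Int) : (popIf t m).length ≤ t.length := by
  unfold popIf; split <;> simp

lemma length_popIf_lt (t : List Int) (m : Int) (h : t.head? = some m) :
    (popIf t m).length < t.length := by
  unfold popIf
  rw [if_pos h]
  cases t with
  | nil => simp at h
  | cons x s => simp

-- the master correspondence: A's loop from indices (i, j, k) is B's loop on the collapsed suffixes
lemma mergeLoop_eq_mergeB (la lb lc : List Int) (fuelA : Nat) :
    ∀ (i j k : Nat) (fuelB : Nat),
      (la.length - i) + (lb.length - j) + (lc.length - k) < fuelA →
      (collapse (la.drop i)).length + (collapse (lb.drop j)).length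
        + (collapse (lc.drop k)).length < fuelB →
      mergeLoop la lb lc i j k fuelA
        = mergeB (collapse (la.drop i)).reverse (collapse (lb.drop j)).reverse
            (collapse (lc.drop k)).reverse fuelB := by
  induction fuelA with
  | zero => intro i j k fuelB hA _; omega
  | succ fuelA ihf =>
    intro i j k fuelB hA hB
    obtain ⟨fuelB, rfl⟩ : ∃ f, fuelB = f + 1 := ⟨fuelB - 1, by omega⟩
    by_cases hg : i < la.length ∨ j < lb.length ∨ k < lc.length
    · rcases hmv : omin (if h : i < la.length then some la[i] else none)
          (omin (if h : j < lb.length then some lb[j] else none)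
                (if h : k < lc.length then some lc[k] else none)) with _ | m
      · -- omin = none: impossible, the guard puts one head in range
        exfalso
        obtain ⟨h1, h2, h3⟩ := omin3_eq_none hmv
        rcases hg with h | h | h
        · simp [h] at h1
        · simp [h] at h2
        · simp [h] at h3
      · -- A emits m; B's min over the heads is the same m
        have hha : (collapse (la.drop i)).head? = (if h : i < la.length then some la[i] else none) := by
          rw [collapse_head, head?_drop]
        have hhb : (collapse (lb.drop j)).head? = (if h : j < lb.length then some lb[j] else none) := by
          rw [collapse_head, head?_drop]
        have hhc : (collapse (lc.drop k)).head? = (if h : k < lc.length then some lc[k] else none) := by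
          rw [collapse_head, head?_drop]
        have hmin : PySem.List.min? (lasts (collapse (la.drop i)).reverse (collapse (lb.drop j)).reverse (collapse (lc.drop k)).reverse) (fun x => x) = some m := by
          rw [min?_lasts_reverse, hha, hhb, hhc, hmv]
        have hgB : (collapse (la.drop i)).reverse ≠ [] ∨ (collapse (lb.drop j)).reverse ≠ [] ∨ (collapse (lc.drop k)).reverse ≠ [] := by
          rcases hg with h | h | h
          · left; intro he; rw [List.reverse_eq_nil_iff] at he; rw [he] at hha; simp [h] at hha
          · right; left; intro he; rw [List.reverse_eq_nil_iff] at he; rw [he] at hhb; simp [h] at hhb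
          · right; right; intro he; rw [List.reverse_eq_nil_iff] at he; rw [he] at hhc; simp [h] at hhc
        have hstepA : mergeLoop la lb lc i j k (fuelA + 1)
            = m :: mergeLoop la lb lc (skipEq la m i) (skipEq lb m j) (skipEq lc m k) fuelA := by
          rw [mergeLoop, if_pos hg, hmv]
        have hstepB : mergeB (collapse (la.drop i)).reverse (collapse (lb.drop j)).reverse (collapse (lc.drop k)).reverse (fuelB + 1)
            = m :: mergeB (popIf (collapse (la.drop i)) m).reverse (popIf (collapse (lb.drop j)) m).reverse
                (popIf (collapse (lc.drop k)) m).reverse fuelB := by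
          rw [mergeB, if_pos hgB, hmin]
          simp only [popLastIf_reverse]
        -- the popped collapsed suffixes are the collapsed skipped suffixes
        have hpa : popIf (collapse (la.drop i)) m = collapse (la.drop (skipEq la m i)) := by
          rw [drop_skipEq, collapse_dropWhile_eq_popIf]
        have hpb : popIf (collapse (lb.drop j)) m = collapse (lb.drop (skipEq lb m j)) := by
          rw [drop_skipEq, collapse_dropWhile_eq_popIf]
        have hpc : popIf (collapse (lc.drop k)) m = collapse (lc.drop (skipEq lc m k)) := by
          rw [drop_skipEq, collapse_dropWhile_eq_popIf]
        -- fuel for A's recursive call: the pointer at the minimum strictly advances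
        have hA' : (la.length - skipEq la m i) + (lb.length - skipEq lb m j)
            + (lc.length - skipEq lc m k) < fuelA := by
          have ga := skipEq_ge la m i
          have gb := skipEq_ge lb m j
          have gc := skipEq_ge lc m k
          have la1 := skipEq_le_len la m i
          have lb1 := skipEq_le_len lb m j
          have lc1 := skipEq_le_len lc m k
          rcases omin3_eq_some hmv with h1 | h1 | h1
          · by_cases h : i < la.length
            · simp [h] at h1
              have := skipEq_lt la m i h h1
              omega
            · simp [h] at h1
          · by_cases h : j < lb.length
            · simp [h] at h1
              have := skipEq_lt lb m j h h1
              omega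
            · simp [h] at h1
          · by_cases h : k < lc.length
            · simp [h] at h1
              have := skipEq_lt lc m k h h1
              omega
            · simp [h] at h1
        -- fuel for B's recursive call: the list holding the minimum loses its head
        have hB' : (popIf (collapse (la.drop i)) m).length + (popIf (collapse (lb.drop j)) m).length
            + (popIf (collapse (lc.drop k)) m).length < fuelB := by
          have p1 := length_popIf_le (collapse (la.drop i)) m
          have p2 := length_popIf_le (collapse (lb.drop j)) m
          have p3 := length_popIf_le (collapse (lc.drop k)) m
          rcases omin3_eq_some hmv with h1 | h1 | h1
          · by_cases h : i < la.length
            · have := length_popIf_lt (collapse (la.drop i)) m (by rw [hha]; simp [h]; simp [h] at h1; omega)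
              omega
            · simp [h] at h1
          · by_cases h : j < lb.length
            · have := length_popIf_lt (collapse (lb.drop j)) m (by rw [hhb]; simp [h]; simp [h] at h1; omega)
              omega
            · simp [h] at h1
          · by_cases h : k < lc.length
            · have := length_popIf_lt (collapse (lc.drop k)) m (by rw [hhc]; simp [h]; simp [h] at h1; omega)
              omega
            · simp [h] at h1
        rw [hstepA, hstepB, hpa, hpb, hpc]
        rw [hpa, hpb, hpc] at hB'
        exact congrArg (m :: ·) (ihf (skipEq la m i) (skipEq lb m j) (skipEq lc m k) fuelB hA' hB')
    · -- every pointer is past its list: both loops stop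
      push Not at hg
      obtain ⟨h1, h2, h3⟩ := hg
      rw [mergeLoop, if_neg (by push Not; exact ⟨h1, h2, h3⟩)]
      rw [List.drop_eq_nil_of_le h1, List.drop_eq_nil_of_le h2, List.drop_eq_nil_of_le h3]
      rw [mergeB, if_neg (by simp [collapse])]

-- ===== VERDICT (by name: the statement is the Claim_ definition above) =====
theorem merger_arrays_spec : Claim_equal_merger_arrays := by
  intro a b c _
  unfold Spec_merger_arrays merger_arrays merger_arrays_alt
  have h := mergeLoop_eq_mergeB a b c (a.length + b.length + c.length + 1) 0 0 0
    ((collapse a).length + (collapse b).length + (collapse c).length + 1)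
    (by omega) (by simp)
  simpa using h
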